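-- pv_equiv track=rewrite | github.com/thetylerb/game_heat_maps | series_prob.py | infer_results_from_standings
-- ===== SOURCE A (Python) =====
-- def infer_results_from_standings(wins_a: int, wins_b: int) -> list[str]:
--     """
--     Produce a plausible game-by-game result list from series standings.
--
--     Strategy: interleave wins so the series looks competitive when possible
--     (A, B, A, B, ...), always ending with a team-A win for the final game.
--
--     Args:
--         wins_a: Total wins for team A.
--         wins_b: Total wins for team B.
--
--     Returns:
--         List of 'A' and 'B' strings with length wins_a + wins_b.
--     """
--     total = wins_a + wins_b
--     if total == 0:
--         return []
--
--     results: list[str] = []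
--     a_remaining, b_remaining = wins_a, wins_b
--
--     for _ in range(total - 1):
--         # Interleave to simulate a realistic series
--         if b_remaining > 0 and (a_remaining == 0 or len(results) % 2 == 1):
--             results.append("B")
--             b_remaining -= 1
--         else:
--             results.append("A")
--             a_remaining -= 1
--
--     # Last game goes to whichever team needs it — keeps the A-wins-final feel
--     results.append("A" if a_remaining > 0 else "B")
--     return results
-- ===== SOURCE B (Python) =====
-- def infer_results_from_standings(wins_a: int, wins_b: int) -> list[str]:
--     m = min(wins_a, wins_b)
--     if wins_a > wins_b:
--         return ["A", "B"] * m + ["A"] * (wins_a - m)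
--     return ["A", "B"] * m + ["B"] * (wins_b - m)
-- ===== Notes on version B (the rewrite author's own statement) =====
-- stated objective: faster
-- what changed: Replaces the per-game simulation loop (a state machine over remaining-win counters and list-length parity, plus a special final append) with a closed-form block construction: min(wins_a, wins_b) copies of ['A','B'] followed by the leading team's leftover block; list repetition/replication runs at C speed instead of one Python iteration per game.
-- outside the precondition, e.g. on infer_results_from_standings(-2, 5): A returns ['A', 'B', 'B'], B returns ['B', 'B', 'B', 'B', 'B', 'B', 'B']; on infer_results_from_standings(3, -4): A returns ['A'], B returns ['A', 'A', 'A', 'A', 'A', 'A', 'A']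
import Mathlib
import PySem

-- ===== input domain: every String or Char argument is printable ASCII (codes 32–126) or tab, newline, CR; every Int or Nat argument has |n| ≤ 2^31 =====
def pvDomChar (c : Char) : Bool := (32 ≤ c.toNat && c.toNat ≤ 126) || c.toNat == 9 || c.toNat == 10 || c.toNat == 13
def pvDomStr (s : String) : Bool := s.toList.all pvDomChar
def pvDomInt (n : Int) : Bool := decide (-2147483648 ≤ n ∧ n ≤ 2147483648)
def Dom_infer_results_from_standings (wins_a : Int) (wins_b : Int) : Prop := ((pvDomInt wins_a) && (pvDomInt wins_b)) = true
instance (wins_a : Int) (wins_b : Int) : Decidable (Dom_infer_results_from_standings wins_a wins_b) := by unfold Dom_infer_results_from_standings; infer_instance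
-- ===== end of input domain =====

-- B replaces A's per-game simulation loop by a closed-form block construction (objective: simpler).


-- ===== PORT A =====
-- literal transliteration of A: a fold over range(total - 1) carrying (results, a_remaining, b_remaining),
-- then the special final append.
def infer_results_from_standings (wins_a : Int) (wins_b : Int) : List String :=
  let total := wins_a + wins_b
  if total = 0 then []
  else
    let st := (PySem.List.pyRange 0 (total - 1) 1).foldl
      (fun (st : List String × Int × Int) (_ : Int) =>
        if st.2.2 > 0 && (st.2.1 == 0 || st.1.length % 2 == 1) then
          (st.1 ++ ["B"], st.2.1, st.2.2 - 1)
        else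
          (st.1 ++ ["A"], st.2.1 - 1, st.2.2))
      ([], wins_a, wins_b)
    st.1 ++ [if st.2.1 > 0 then "A" else "B"]

-- ===== PORT B =====
-- literal transliteration of Source B: ["A","B"] * min(wins_a, wins_b) plus the leading team's leftover
-- block (Python's list * n is empty for n ≤ 0, which is exactly List.replicate n.toNat).
def infer_results_from_standings_alt (wins_a : Int) (wins_b : Int) : List String :=
  let m := min wins_a wins_b
  if wins_a > wins_b then
    (List.replicate m.toNat (["A", "B"] : List String)).flatten ++ List.replicate (wins_a - m).toNat "A"
  else
    (List.replicate m.toNat (["A", "B"] : List String)).flatten ++ List.replicate (wins_b - m).toNat "B"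

-- ===== PRECONDITION & SPEC =====
-- Pre_ restricts to the natural domain of win counts (both nonnegative); on negative counts A still
-- returns a value, but it is an accident of the loop (e.g. a single-element list for a negative total)
-- that no caller building a game list from standings would specify, and B's value there differs.
def Pre_infer_results_from_standings (wins_a : Int) (wins_b : Int) : Prop :=
  0 ≤ wins_a ∧ 0 ≤ wins_b
instance (wins_a : Int) (wins_b : Int) : Decidable (Pre_infer_results_from_standings wins_a wins_b) := by
  unfold Pre_infer_results_from_standings; infer_instance

def pvWitness_infer_results_from_standings : Int × Int := (3, 2)

def Spec_infer_results_from_standings (wins_a : Int) (wins_b : Int) (out : List String) : Prop := out = infer_results_from_standings_alt wins_a wins_b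
instance (wins_a : Int) (wins_b : Int) (out : List String) : Decidable (Spec_infer_results_from_standings wins_a wins_b out) := by unfold Spec_infer_results_from_standings; infer_instance

-- ===== CLAIM (what is proved, stated in full; the proofs are below) =====
def Claim_equal_infer_results_from_standings : Prop := ∀ (wins_a : Int) (wins_b : Int), Dom_infer_results_from_standings wins_a wins_b → Pre_infer_results_from_standings wins_a wins_b → Spec_infer_results_from_standings wins_a wins_b (infer_results_from_standings wins_a wins_b)

-- ===== LEMMAS AND PROOFS =====

-- the loop body of A, as a step function on the state (results, a_remaining, b_remaining)
def pvStep (st : List String × Int × Int) : List String × Int × Int :=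
  if st.2.2 > 0 && (st.2.1 == 0 || st.1.length % 2 == 1) then
    (st.1 ++ ["B"], st.2.1, st.2.2 - 1)
  else
    (st.1 ++ ["A"], st.2.1 - 1, st.2.2)

-- A's fold ignores the range elements: it is an iteration of pvStep, length-many times
theorem pv_foldl_iter (l : List Int) (s : List String × Int × Int) :
    List.foldl
      (fun (st : List String × Int × Int) (_ : Int) =>
        if st.2.2 > 0 && (st.2.1 == 0 || st.1.length % 2 == 1) then
          (st.1 ++ ["B"], st.2.1, st.2.2 - 1)
        else
          (st.1 ++ ["A"], st.2.1 - 1, st.2.2)) s l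
    = pvStep^[l.length] s := by
  induction l generalizing s with
  | nil => rfl
  | cons x xs ih =>
      rw [List.foldl_cons, ih, List.length_cons, Function.iterate_succ_apply]
      rfl

-- an even-length prefix of the results list passes through one step unchanged
theorem pv_step_prefix (pre r : List String) (a b : Int) (hpre : pre.length % 2 = 0) :
    pvStep (pre ++ r, a, b) = (pre ++ (pvStep (r, a, b)).1, (pvStep (r, a, b)).2) := by
  have h2 : (pre.length + r.length) % 2 = r.length % 2 := by omega
  simp only [pvStep, List.length_append, h2]
  split_ifs <;> simp

-- … and hence through the whole iteration
theorem pv_iter_prefix (n : Nat) : ∀ (pre r : List String) (a b : Int), pre.length % 2 = 0 →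
    pvStep^[n] (pre ++ r, a, b)
      = (pre ++ (pvStep^[n] (r, a, b)).1, (pvStep^[n] (r, a, b)).2) := by
  induction n with
  | zero => intro pre r a b _; rfl
  | succ n ih =>
      intro pre r a b hpre
      rw [Function.iterate_succ_apply, Function.iterate_succ_apply,
        pv_step_prefix _ _ _ _ hpre]
      have := ih pre (pvStep (r, a, b)).1 (pvStep (r, a, b)).2.1 (pvStep (r, a, b)).2.2 hpre
      simpa using this

-- with no B's remaining the loop appends only A's
theorem pv_iter_allA (n : Nat) : ∀ (r : List String) (a : Int),
    pvStep^[n] (r, a, 0) = (r ++ List.replicate n "A", a - n, 0) := by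
  induction n with
  | zero => intro r a; simp
  | succ n ih =>
      intro r a
      rw [Function.iterate_succ_apply]
      have hstep : pvStep (r, a, 0) = (r ++ ["A"], a - 1, 0) := by simp [pvStep]
      rw [hstep, ih]
      simp [List.replicate_succ]
      omega

-- with no A's remaining (and enough B's left) the loop appends only B's
theorem pv_iter_allB (n : Nat) : ∀ (r : List String) (b : Int), (n : Int) < b →
    pvStep^[n] (r, 0, b) = (r ++ List.replicate n "B", 0, b - n) := by
  induction n with
  | zero => intro r b _; simp
  | succ n ih =>
      intro r b hb
      rw [Function.iterate_succ_apply]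
      have hstep : pvStep (r, 0, b) = (r ++ ["B"], 0, b - 1) := by
        simp [pvStep]; omega
      rw [hstep, ih _ _ (by omega)]
      simp [List.replicate_succ]
      omega

-- A, written through the step iteration
theorem pv_A_iter (a b : Int) (h : ¬ a + b = 0) :
    infer_results_from_standings a b =
      (pvStep^[(a + b - 1).toNat] ([], a, b)).1
        ++ [if (pvStep^[(a + b - 1).toNat] ([], a, b)).2.1 > 0 then "A" else "B"] := by
  simp only [infer_results_from_standings, if_neg h, pv_foldl_iter,
    PySem.List.length_pyRange_one]
  norm_num

-- peeling one ["A","B"] pair off B's closed form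
theorem pv_alt_peel (a b : Int) (ha : 1 ≤ a) (hb : 1 ≤ b) :
    infer_results_from_standings_alt a b =
      "A" :: "B" :: infer_results_from_standings_alt (a - 1) (b - 1) := by
  have hm : (min a b).toNat = (min (a - 1) (b - 1)).toNat + 1 := by omega
  have h1 : a - min a b = (a - 1) - min (a - 1) (b - 1) := by omega
  by_cases hab : a > b
  · simp only [infer_results_from_standings_alt, hm, List.replicate_succ, List.flatten_cons,
      if_pos hab, if_pos (by omega : a - 1 > b - 1), h1]
    simp
  · simp only [infer_results_from_standings_alt, hm, List.replicate_succ, List.flatten_cons,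
      if_neg hab, if_neg (by omega : ¬ (a - 1 > b - 1)),
      show b - min a b = (b - 1) - min (a - 1) (b - 1) by omega]
    simp

-- main equivalence, by induction on min(a, b): base cases are the one-sided runs,
-- the step peels the leading A, B pair off both programs
theorem pv_main (k : Nat) : ∀ (a b : Int), 0 ≤ a → 0 ≤ b → (min a b).toNat = k →
    infer_results_from_standings a b = infer_results_from_standings_alt a b := by
  induction k with
  | zero =>
      intro a b ha hb hk
      by_cases h0 : a + b = 0
      · have ha0 : a = 0 := by omega
        have hb0 : b = 0 := by omega
        subst ha0; subst hb0; decide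
      · by_cases hb0 : b = 0
        · -- only A's
          subst hb0
          rw [pv_A_iter a 0 h0]
          have hn : ((a + 0 - 1).toNat : Int) = a - 1 := by omega
          rw [pv_iter_allA (a + 0 - 1).toNat [] a]
          simp only [List.nil_append, hn]
          rw [if_pos (by omega : a - (a - 1) > 0)]
          rw [← List.replicate_succ']
          simp only [infer_results_from_standings_alt]
          rw [if_pos (by omega : a > (0 : Int))]
          rw [show (min a 0) = 0 by omega]
          simp
          omega
        · -- a = 0, only B's
          have ha0 : a = 0 := by omega
          subst ha0
          rw [pv_A_iter 0 b h0]
          have hlt : (((0 + b - 1).toNat : Nat) : Int) < b := by omega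
          rw [pv_iter_allB (0 + b - 1).toNat [] b hlt]
          simp only [List.nil_append]
          rw [if_neg (by omega : ¬ ((0 : Int) > 0))]
          rw [← List.replicate_succ']
          simp only [infer_results_from_standings_alt]
          rw [if_neg (by omega : ¬ ((0 : Int) > b))]
          rw [show (min (0 : Int) b) = 0 by omega]
          simp
          omega
  | succ k ih =>
      intro a b ha hb hk
      have ha1 : 1 ≤ a := by omega
      have hb1 : 1 ≤ b := by omega
      by_cases h11 : a = 1 ∧ b = 1
      · obtain ⟨h1, h2⟩ := h11; subst h1; subst h2; decide
      · have h0 : ¬ a + b = 0 := by omega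
        have h0' : ¬ (a - 1) + (b - 1) = 0 := by omega
        have hn : (a + b - 1).toNat = (a + b - 3).toNat + 2 := by omega
        have hstep1 : pvStep (([] : List String), a, b) = (["A"], a - 1, b) := by
          have : ¬ a = 0 := by omega
          simp [pvStep, this]
        have hstep2 : pvStep ((["A"] : List String), a - 1, b) = (["A", "B"], a - 1, b - 1) := by
          simp [pvStep]
          omega
        rw [pv_A_iter a b h0, hn, Function.iterate_add_apply]
        have h2 : pvStep^[2] (([] : List String), a, b) = (["A", "B"], a - 1, b - 1) := by
          rw [show (2 : Nat) = 1 + 1 from rfl, Function.iterate_add_apply]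
          simp [hstep1, hstep2]
        rw [h2]
        have hpre := pv_iter_prefix (a + b - 3).toNat ["A", "B"] [] (a - 1) (b - 1) (by simp)
        simp only [List.append_nil] at hpre
        rw [hpre, show (a + b - 3).toNat = ((a - 1) + (b - 1) - 1).toNat by omega]
        rw [pv_alt_peel a b ha1 hb1, ← ih (a - 1) (b - 1) (by omega) (by omega) (by omega),
          pv_A_iter (a - 1) (b - 1) h0']
        simp

-- ===== VERDICT (by name: the statement is the Claim_ definition above) =====
theorem infer_results_from_standings_spec : Claim_equal_infer_results_from_standings := by
  intro a b _ hpre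
  exact pv_main (min a b).toNat a b hpre.1 hpre.2 rfl
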